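-- pv_equiv track=rewrite | github.com/csams/squerly | squerly/models/lsof.py | parse
-- ===== SOURCE A (Python) =====
-- def _get_intervals(line):
--     looking_for_start = True
--     results = []
--     t = 0
--     for i, c in enumerate(line):
--         if looking_for_start:
--             if c.isspace():
--                 continue
--             t = i
--             looking_for_start = False
--         else:
--             if not c.isspace():
--                 continue
--             results.append((t, i))
--             looking_for_start = True
--     if t and i:
--         results.append((t, i + 1))
--     return results
--
-- def _intersect(a, b):
--     return max((a[0], b[0])) < min((a[1], b[1]))
--
-- def parse(content):
--     top = content[0]
--     header_intervals = _get_intervals(top)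
--     headers = dict((top[l:r].lower(), (l, r)) for (l, r) in header_intervals)
--     results = []
--     for line in content[1:]:
--         one = []
--         intervals = _get_intervals(line)
--         for i in intervals:
--             val = line[slice(*i)]
--             for key, h in headers.items():
--                 if _intersect(i, h):
--                     one.append((key, val))
--                     break
--         results.append(dict(one))
--     return results
-- ===== SOURCE B (Python) =====
-- def _get_intervals(line):
--     looking_for_start = True
--     results = []
--     t = 0
--     for i, c in enumerate(line):
--         if looking_for_start:
--             if c.isspace():
--                 continue
--             t = i
--             looking_for_start = False
--         else:
--             if not c.isspace():
--                 continue
--             results.append((t, i))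
--             looking_for_start = True
--     if t and i:
--         results.append((t, i + 1))
--     return results
--
-- def parse(content):
--     top = content[0]
--     headers = dict((top[l:r].lower(), (l, r)) for (l, r) in _get_intervals(top))
--     items = list(headers.items())
--     keys = [k for k, _ in items]
--     maxlen = 0
--     for line in content[1:]:
--         maxlen = max(maxlen, len(line))
--     # column-ownership table: table[c] = index of the first header whose span covers column c
--     table = [next((j for j, (_, (l, r)) in enumerate(items) if l <= c < r), None)
--              for c in range(maxlen)]
--     results = []
--     for line in content[1:]:
--         one = []
--         for t, e in _get_intervals(line):
--             owners = [table[c] for c in range(t, e) if table[c] is not None]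
--             if owners:
--                 one.append((keys[min(owners)], line[t:e]))
--         results.append(dict(one))
--     return results
-- ===== Notes on version B (the rewrite author's own statement) =====
-- stated objective: alternative
-- what changed: A resolves each token by scanning the header dict with an interval-intersection test and an early break; B precomputes once a column-ownership table mapping every character column to the index of the first header covering it, then resolves each token by taking the minimum owner index over its columns - no intersection test or header scan per token.
import Mathlib
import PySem

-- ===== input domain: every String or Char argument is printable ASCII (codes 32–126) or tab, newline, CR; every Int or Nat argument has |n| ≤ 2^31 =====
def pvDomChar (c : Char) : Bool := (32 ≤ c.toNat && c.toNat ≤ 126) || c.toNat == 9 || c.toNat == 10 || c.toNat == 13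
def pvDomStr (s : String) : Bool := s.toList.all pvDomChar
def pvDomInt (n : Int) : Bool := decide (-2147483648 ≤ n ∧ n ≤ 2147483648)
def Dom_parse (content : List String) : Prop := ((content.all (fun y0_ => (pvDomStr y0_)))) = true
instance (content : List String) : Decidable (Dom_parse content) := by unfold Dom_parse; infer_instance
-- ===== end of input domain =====

-- B replaces A's per-token scan of the header dict (intersection test + break) by a
-- column-ownership table built once (column ↦ index of first covering header); each token
-- then takes the minimum owner index over its columns. Objective: alternative.
-- Neither function mutates its argument.

-- ===== PORT A =====
-- shared helper: both Pythons contain the identical `_get_intervals` (and the identical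
-- dict-of-headers construction), so both ports use these transliterations.
def giStep (st : Bool × List (Int × Int) × Int) (ic : Int × Char) : Bool × List (Int × Int) × Int :=
  if st.1 then
    if PySem.Chars.isspace ic.2 then st
    else (false, st.2.1, ic.1)
  else
    if !(PySem.Chars.isspace ic.2) then st
    else (true, st.2.1 ++ [(st.2.2, ic.1)], st.2.2)

def getIntervals (line : String) : List (Int × Int) :=
  let cs := line.toList
  let st := (PySem.List.enumerate cs 0).foldl giStep (true, [], 0)
  match cs with
  | [] => st.2.1  -- empty line: `t and i` short-circuits on t = 0, so Python appends nothing
  | _ =>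
    let i : Int := (cs.length : Int) - 1
    if st.2.2 ≠ 0 ∧ i ≠ 0 then st.2.1 ++ [(st.2.2, i + 1)] else st.2.1

def intersect (a b : Int × Int) : Bool := decide (max a.1 b.1 < min a.2 b.2)

def headersOf (top : String) : PySem.Dict String (Int × Int) :=
  (getIntervals top).foldl
    (fun d p => d.insert (PySem.Str.lower (PySem.Str.slice top (some p.1) (some p.2))) p)
    PySem.Dict.empty

-- A's inner `for key, h in headers.items(): if _intersect(i, h): …; break`
def firstKey (hs : List (String × (Int × Int))) (iv : Int × Int) : Option String :=
  match hs with
  | [] => none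
  | (k, h) :: rest => if intersect iv h then some k else firstKey rest iv

def parseLineA (headers : PySem.Dict String (Int × Int)) (line : String) : List (String × String) :=
  let one := (getIntervals line).foldl
    (fun one iv =>
      let val := PySem.Str.slice line (some iv.1) (some iv.2)
      match firstKey headers.items iv with
      | some k => one ++ [(k, val)]
      | none => one) []
  (PySem.Dict.ofList one).items

def parse (content : List String) : List (List (String × String)) :=
  match content with
  | [] => []  -- Python raises IndexError on content[0]; excluded by Pre_parse
  | top :: rest =>
    let headers := headersOf top
    rest.foldl (fun results line => results ++ [parseLineA headers line]) []

-- ===== PORT B =====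
-- `next((j for j, (_, (l, r)) in enumerate(items) if l <= c < r), None)`
def firstCover (items : List (String × (Int × Int))) (j : Int) (c : Int) : Option Int :=
  match items with
  | [] => none
  | (_, h) :: rest => if h.1 ≤ c ∧ c < h.2 then some j else firstCover rest (j + 1) c

def parseLineB (table : List (Option Int)) (keys : List String) (line : String) :
    List (String × String) :=
  let one := (getIntervals line).foldl
    (fun one iv =>
      -- owners = [table[c] for c in range(t, e) if table[c] is not None]
      let owners := (PySem.List.pyRange iv.1 iv.2 1).foldl
        (fun acc c =>
          match (PySem.List.pyGet? table c).join with
          | some j => acc ++ [j]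
          | none => acc) []
      -- if owners: one.append((keys[min(owners)], line[t:e]))
      match PySem.List.min? owners (fun x => x) with
      | some m =>
          one ++ [((PySem.List.pyGet? keys m).getD "",  -- keys[m]; m is always in range here
                   PySem.Str.slice line (some iv.1) (some iv.2))]
      | none => one) []
  (PySem.Dict.ofList one).items

def parse_alt (content : List String) : List (List (String × String)) :=
  match content with
  | [] => []
  | top :: rest =>
    let items := (headersOf top).items
    let keys := items.map Prod.fst
    let maxlen : Int := rest.foldl (fun m line => max m (PySem.Str.len line)) 0
    let table := (PySem.List.pyRange 0 maxlen 1).map (fun c => firstCover items 0 c)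
    rest.map (fun line => parseLineB table keys line)

-- ===== PRECONDITION & SPEC =====
-- Pre_ excludes exactly the inputs where A raises: the empty list (IndexError on content[0]).
-- (Empty lines are fine: in `if t and i` the falsy t short-circuits before the unbound `i`.)
def Pre_parse (content : List String) : Prop := content ≠ []
instance (content : List String) : Decidable (Pre_parse content) := by unfold Pre_parse; infer_instance

def pvWitness_parse : List String := ["COMMAND  PID USER", "bash     117 root"]

def Spec_parse (content : List String) (out : List (List (String × String))) : Prop := out = parse_alt content
instance (content : List String) (out : List (List (String × String))) : Decidable (Spec_parse content out) := by unfold Spec_parse; infer_instance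

-- ===== CLAIM (what is proved, stated in full; the proofs are below) =====
def Claim_equal_parse : Prop := ∀ (content : List String), Dom_parse content → Pre_parse content → Spec_parse content (parse content)

-- ===== LEMMAS AND PROOFS =====

-- index version of A's first-intersecting-header scan (proof-side only)
def firstIdx (items : List (String × (Int × Int))) (j : Int) (iv : Int × Int) : Option Int :=
  match items with
  | [] => none
  | (_, h) :: rest => if intersect iv h then some j else firstIdx rest (j + 1) iv

theorem fc_ge (items : List (String × (Int × Int))) (j c v : Int)
    (h : firstCover items j c = some v) : j ≤ v := by
  induction items generalizing j with
  | nil => simp [firstCover] at h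
  | cons p rest ih =>
    unfold firstCover at h
    split at h
    · cases h; omega
    · have := ih (j + 1) h; omega

theorem foldl_match_append (f : Int → Option Int) (l : List Int) (acc : List Int) :
    l.foldl (fun acc c => match f c with | some j => acc ++ [j] | none => acc) acc
      = acc ++ l.filterMap f := by
  induction l generalizing acc with
  | nil => simp
  | cons c t ih =>
    simp only [List.foldl_cons, List.filterMap_cons]
    cases h : f c <;> simp [ih]

-- min of a list with a known least member
theorem min?_id_eq_of (l : List Int) (a : Int) (ha : a ∈ l) (hle : ∀ x ∈ l, a ≤ x) :
    PySem.List.min? l (fun x => x) = some a := by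
  cases l with
  | nil => simp at ha
  | cons x t =>
    rw [PySem.List.min?_id_cons]
    have hmem := PySem.List.foldl_min_mem t x
    have hle' := PySem.List.foldl_min_le t x
    have h1 : a ≤ t.foldl min x := by
      rcases hmem with h | h
      · rw [h]; exact hle x (by simp)
      · exact hle _ (by simp [h])
    have h2 : t.foldl min x ≤ a := by
      rcases List.mem_cons.mp ha with rfl | h
      · exact hle'.1
      · exact hle'.2 a h
    have : t.foldl min x = a := le_antisymm h2 h1
    simp [this]

-- the min owner over a token's columns is the first intersecting header
theorem min_owners_eq_firstIdx (items : List (String × (Int × Int))) (j t e : Int)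
    (hte : t < e) :
    PySem.List.min? ((PySem.List.pyRange t e 1).filterMap (fun c => firstCover items j c))
        (fun x => x)
      = firstIdx items j (t, e) := by
  induction items generalizing j with
  | nil =>
    simp only [firstCover, firstIdx]
    rw [PySem.List.min?_eq_none_iff]
    simp
  | cons p rest ih =>
    obtain ⟨k, h⟩ := p
    unfold firstIdx
    by_cases hi : intersect (t, e) h = true
    · rw [if_pos hi]
      simp only [intersect, decide_eq_true_eq] at hi
      apply min?_id_eq_of
      · apply List.mem_filterMap.mpr
        refine ⟨max t h.1, ?_, ?_⟩
        · rw [PySem.List.mem_pyRange_one]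
          simp at hi ⊢
          omega
        · unfold firstCover
          rw [if_pos (by simp at hi ⊢; omega)]
      · intro x hx
        obtain ⟨c, _, hfc⟩ := List.mem_filterMap.mp hx
        unfold firstCover at hfc
        split at hfc
        · cases hfc; omega
        · have := fc_ge rest (j + 1) c x hfc; omega
    · rw [if_neg hi]
      simp only [intersect, decide_eq_true_eq] at hi
      rw [List.filterMap_congr (l := PySem.List.pyRange t e 1)
        (g := fun c => firstCover rest (j + 1) c) ?_]
      · exact ih (j + 1)
      · intro c hc
        rw [PySem.List.mem_pyRange_one] at hc
        show firstCover ((k, h) :: rest) j c = firstCover rest (j + 1) c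
        unfold firstCover
        rw [if_neg (by simp at hi ⊢; omega)]
        cases rest <;> rfl

-- A's firstKey is firstIdx followed by the key lookup
theorem firstKey_eq_firstIdx (items : List (String × (Int × Int))) (iv : Int × Int)
    (pre : List String) :
    (firstIdx items (pre.length : Int) iv).map
        (fun m => (PySem.List.pyGet? (pre ++ items.map Prod.fst) m).getD "")
      = firstKey items iv := by
  induction items generalizing pre with
  | nil => simp [firstIdx, firstKey]
  | cons p rest ih =>
    obtain ⟨k, h⟩ := p
    unfold firstIdx firstKey
    by_cases hi : intersect iv h = true
    · rw [if_pos hi, if_pos hi]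
      simp only [Option.map_some, List.map_cons]
      rw [PySem.List.pyGet?_append_length]
      rfl
    · rw [if_neg hi, if_neg hi]
      have := ih (pre ++ [k])
      simp only [List.length_append, List.length_cons, List.length_nil] at this
      rw [show ((pre.length : Int) + 1) = (((pre.length + (0 + 1) : Nat)) : Int) by push_cast; ring]
      rw [← this]
      congr 1
      simp

-- invariant of the `_get_intervals` loop
theorem gi_inv (cs : List Char) (k : Int) (st : Bool × List (Int × Int) × Int)
    (hk : 0 ≤ k)
    (hres : ∀ p ∈ st.2.1, 0 ≤ p.1 ∧ p.1 < p.2 ∧ p.2 ≤ k)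
    (ht0 : 0 ≤ st.2.2) (ht1 : st.2.2 ≤ k)
    (ht2 : st.2.2 = 0 ∨ st.2.2 < k) (ht3 : st.1 = false → st.2.2 < k) :
    (∀ p ∈ ((PySem.List.enumerate cs k).foldl giStep st).2.1,
        0 ≤ p.1 ∧ p.1 < p.2 ∧ p.2 ≤ k + cs.length) ∧
      0 ≤ ((PySem.List.enumerate cs k).foldl giStep st).2.2 ∧
      ((PySem.List.enumerate cs k).foldl giStep st).2.2 ≤ k + cs.length ∧
      (((PySem.List.enumerate cs k).foldl giStep st).2.2 = 0 ∨
        ((PySem.List.enumerate cs k).foldl giStep st).2.2 < k + cs.length) ∧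
      (((PySem.List.enumerate cs k).foldl giStep st).1 = false →
        ((PySem.List.enumerate cs k).foldl giStep st).2.2 < k + cs.length) := by
  induction cs generalizing k st with
  | nil =>
    simp only [PySem.List.enumerate_nil, List.foldl_nil, List.length_nil, Nat.cast_zero, add_zero]
    exact ⟨hres, ht0, ht1, ht2, ht3⟩
  | cons c t ih =>
    rw [PySem.List.enumerate_cons, List.foldl_cons]
    obtain ⟨b, res, tv⟩ := st
    simp only at hres ht0 ht1 ht2 ht3
    have hcase : giStep (b, res, tv) (k, c) = (b, res, tv) ∨
        (b = true ∧ giStep (b, res, tv) (k, c) = (false, res, k)) ∨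
        (b = false ∧ giStep (b, res, tv) (k, c) = (true, res ++ [(tv, k)], tv)) := by
      cases b <;> by_cases hs : PySem.Chars.isspace c = true <;> simp [giStep, hs]
    have step : ∀ st1 : Bool × List (Int × Int) × Int,
        giStep (b, res, tv) (k, c) = st1 →
        (∀ p ∈ st1.2.1, 0 ≤ p.1 ∧ p.1 < p.2 ∧ p.2 ≤ k + 1) →
        0 ≤ st1.2.2 → st1.2.2 ≤ k + 1 → (st1.2.2 = 0 ∨ st1.2.2 < k + 1) →
        (st1.1 = false → st1.2.2 < k + 1) →
        (∀ p ∈ ((PySem.List.enumerate t (k + 1)).foldl giStep st1).2.1,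
            0 ≤ p.1 ∧ p.1 < p.2 ∧ p.2 ≤ k + (c :: t).length) ∧
          0 ≤ ((PySem.List.enumerate t (k + 1)).foldl giStep st1).2.2 ∧
          ((PySem.List.enumerate t (k + 1)).foldl giStep st1).2.2 ≤ k + (c :: t).length ∧
          (((PySem.List.enumerate t (k + 1)).foldl giStep st1).2.2 = 0 ∨
            ((PySem.List.enumerate t (k + 1)).foldl giStep st1).2.2 < k + (c :: t).length) ∧
          (((PySem.List.enumerate t (k + 1)).foldl giStep st1).1 = false →
            ((PySem.List.enumerate t (k + 1)).foldl giStep st1).2.2 < k + (c :: t).length) := by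
      intro st1 heq h1 h2 h3 h4 h5
      obtain ⟨g1, g2, g3, g4, g5⟩ := ih (k + 1) st1 (by omega) h1 h2 h3 h4 h5
      have hlen : k + ((c :: t).length : Int) = (k + 1) + (t.length : Int) := by
        push_cast [List.length_cons]; ring
      rw [hlen]
      exact ⟨g1, g2, g3, g4, g5⟩
    rcases hcase with heq | ⟨hb, heq⟩ | ⟨hb, heq⟩
    · rw [heq]
      refine step _ heq ?_ ?_ ?_ ?_ ?_ <;> dsimp only
      · intro p hp; have := hres p hp; omega
      · omega
      · omega
      · omega
      · intro hb'; have := ht3 hb'; omega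
    · rw [heq]
      refine step _ heq ?_ ?_ ?_ ?_ ?_ <;> dsimp only
      · intro p hp; have := hres p hp; omega
      · omega
      · omega
      · omega
      · intro _; omega
    · rw [heq]
      subst hb
      have htv := ht3 rfl
      refine step _ heq ?_ ?_ ?_ ?_ ?_ <;> dsimp only
      · intro p hp
        rcases List.mem_append.mp hp with hp | hp
        · have := hres p hp; omega
        · rw [List.mem_singleton] at hp
          subst hp
          dsimp only
          omega
      · omega
      · omega
      · omega
      · intro h; cases h

theorem gi_bounds (line : String) :
    ∀ p ∈ getIntervals line, 0 ≤ p.1 ∧ p.1 < p.2 ∧ p.2 ≤ (line.toList.length : Int) := by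
  intro p hp
  unfold getIntervals at hp
  rcases hcs : line.toList with _ | ⟨c, t⟩
  · rw [hcs] at hp
    simp [PySem.List.enumerate_nil] at hp
  · rw [hcs] at hp
    simp only at hp
    have inv := gi_inv (c :: t) 0 (true, [], 0) (by omega) (by simp) (by simp) (by simp)
      (by simp) (by simp)
    obtain ⟨g1, g2, g3, g4, g5⟩ := inv
    simp only [zero_add] at g1 g2 g3 g4 g5
    split at hp
    · rename_i hguard
      rcases List.mem_append.mp hp with hp | hp
      · have := g1 p hp
        push_cast [List.length_cons] at this ⊢
        omega
      · rw [List.mem_singleton] at hp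
        subst hp
        dsimp only
        have hne := hguard.1
        push_cast [List.length_cons] at g4 ⊢
        omega
    · have := g1 p hp
      push_cast [List.length_cons] at this ⊢
      omega

-- table lookup = firstCover, on in-range columns
theorem table_lookup (items : List (String × (Int × Int))) (maxlen c : Int)
    (h0 : 0 ≤ c) (h1 : c < maxlen) :
    (PySem.List.pyGet? ((PySem.List.pyRange 0 maxlen 1).map (fun c => firstCover items 0 c)) c).join
      = firstCover items 0 c := by
  rw [PySem.List.pyGet?_of_nonneg _ h0, PySem.List.pyRange_one, List.map_map, List.getElem?_map,
    List.getElem?_range (by omega : c.toNat < (maxlen - 0).toNat)]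
  simp [Function.comp]
  congr 1
  omega

theorem parseLine_eq (d : PySem.Dict String (Int × Int)) (maxlen : Int) (line : String)
    (hlen : (line.toList.length : Int) ≤ maxlen) :
    parseLineB ((PySem.List.pyRange 0 maxlen 1).map (fun c => firstCover d.items 0 c))
        (d.items.map Prod.fst) line
      = parseLineA d line := by
  unfold parseLineA parseLineB
  simp only
  congr 1
  congr 1
  apply PySem.List.foldl_congr_mem
  intro acc iv hiv
  obtain ⟨t0, e0⟩ := iv
  obtain ⟨hb0, hb1, hb2⟩ := gi_bounds line (t0, e0) hiv
  simp only at hb0 hb1 hb2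
  simp only
  have howners : (PySem.List.pyRange t0 e0 1).foldl
      (fun acc c =>
        match (PySem.List.pyGet? ((PySem.List.pyRange 0 maxlen 1).map
            (fun c => firstCover d.items 0 c)) c).join with
        | some j => acc ++ [j]
        | none => acc) []
      = (PySem.List.pyRange t0 e0 1).filterMap (fun c => firstCover d.items 0 c) := by
    rw [foldl_match_append]
    simp only [List.nil_append]
    apply List.filterMap_congr
    intro c hc
    rw [PySem.List.mem_pyRange_one] at hc
    exact table_lookup d.items maxlen c (by omega) (by omega)
  rw [howners, min_owners_eq_firstIdx d.items 0 t0 e0 hb1]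
  have hkey := firstKey_eq_firstIdx d.items (t0, e0) []
  simp only [List.length_nil, Nat.cast_zero, List.nil_append] at hkey
  cases hfi : firstIdx d.items 0 (t0, e0) with
  | none =>
    rw [hfi] at hkey
    simp only [Option.map_none] at hkey
    rw [← hkey]
  | some m =>
    rw [hfi] at hkey
    simp only [Option.map_some] at hkey
    rw [← hkey]

-- ===== VERDICT (by name: the statement is the Claim_ definition above) =====
theorem parse_spec : Claim_equal_parse := by
  intro content _ _
  unfold Spec_parse parse parse_alt
  cases content with
  | nil => rfl
  | cons top rest =>
    simp only [PySem.List.foldl_append_singleton_eq_map, List.nil_append]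
    apply List.map_congr_left
    intro line hline
    have hlen : (line.toList.length : Int) ≤
        rest.foldl (fun m line => max m (PySem.Str.len line)) 0 := by
      have := (PySem.List.le_foldl_max_int rest (fun l => PySem.Str.len l) 0).2 line hline
      simpa [PySem.Str.len_eq] using this
    exact (parseLine_eq (headersOf top) _ line hlen).symm
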